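-- pv_equiv track=rewrite | github.com/MarcosDuro/Extras | main.py | ocultar_digitos_tarjeta
-- ===== SOURCE A (Python) =====
-- def ocultar_digitos_tarjeta(card_number):
--     oculto = ""
--     for i, digito in enumerate(card_number):
--         if i in [7, 10, 11, 14]:
--             oculto += "x"
--         else:
--             oculto += digito
--     return oculto
-- ===== SOURCE B (Python) =====
-- def ocultar_digitos_tarjeta(card_number):
--     chars = list(card_number)
--     for p in (7, 10, 11, 14):
--         if p < len(chars):
--             chars[p] = 'x'
--     return ''.join(chars)
-- ===== Notes on version B (the rewrite author's own statement) =====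
-- stated objective: faster
-- what changed: Instead of scanning every character and testing its index against the masked-position list while growing a string, B writes the mask character directly into the four fixed positions of a char list (guarded by length) and joins once.
import Mathlib
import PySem

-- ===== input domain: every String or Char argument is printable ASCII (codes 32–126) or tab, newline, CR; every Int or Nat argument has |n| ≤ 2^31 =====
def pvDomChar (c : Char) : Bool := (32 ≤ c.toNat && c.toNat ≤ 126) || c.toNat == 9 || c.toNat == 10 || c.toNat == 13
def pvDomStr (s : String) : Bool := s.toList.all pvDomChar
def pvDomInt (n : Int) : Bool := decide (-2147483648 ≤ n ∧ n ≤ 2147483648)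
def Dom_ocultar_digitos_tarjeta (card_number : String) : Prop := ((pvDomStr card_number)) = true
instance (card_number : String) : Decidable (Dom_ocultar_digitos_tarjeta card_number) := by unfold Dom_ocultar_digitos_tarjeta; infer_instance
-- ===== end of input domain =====

-- B replaces A's per-character scan (index tested against the position list) with direct
-- length-guarded writes of 'x' at the four fixed positions of a char list; objective: simpler.

-- ===== PORT A =====
-- oculto = ""; for i, digito in enumerate(card_number): oculto += "x" if i in [7,10,11,14] else digito
def ocultar_digitos_tarjeta (card_number : String) : String :=
  String.ofList ((PySem.List.enumerate card_number.toList 0).foldl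
    (fun oculto p => oculto ++ (if p.1 ∈ ([7, 10, 11, 14] : List Int) then ['x'] else [p.2])) [])

-- ===== PORT B =====
-- chars = list(card_number); for p in (7,10,11,14): if p < len(chars): chars[p] = 'x'; return ''.join(chars)
def ocultar_digitos_tarjeta_alt (card_number : String) : String :=
  String.ofList (([7, 10, 11, 14] : List Nat).foldl
    (fun chars p => if p < chars.length then chars.set p 'x' else chars) card_number.toList)

-- ===== PRECONDITION & SPEC =====
def Spec_ocultar_digitos_tarjeta (card_number : String) (out : String) : Prop := out = ocultar_digitos_tarjeta_alt card_number
instance (card_number : String) (out : String) : Decidable (Spec_ocultar_digitos_tarjeta card_number out) := by unfold Spec_ocultar_digitos_tarjeta; infer_instance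

-- ===== CLAIM (what is proved, stated in full; the proofs are below) =====
def Claim_equal_ocultar_digitos_tarjeta : Prop := ∀ (card_number : String), Dom_ocultar_digitos_tarjeta card_number → Spec_ocultar_digitos_tarjeta card_number (ocultar_digitos_tarjeta card_number)

-- ===== LEMMAS AND PROOFS =====

-- a length-guarded set is List.set (which is a no-op out of range)
theorem pv_guarded_set (cs : List Char) (p : Nat) :
    (if p < cs.length then cs.set p 'x' else cs) = cs.set p 'x' := by
  split
  · rfl
  · exact (List.set_eq_of_length_le (by omega)).symm

theorem pv_flatMap_singleton (f : (Int × Char) → Char) (l : List (Int × Char)) :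
    l.flatMap (fun p => [f p]) = l.map f := by
  induction l with
  | nil => rfl
  | cons x xs ih => simp [List.flatMap_cons, ih]

theorem pv_lists_eq (l : List Char) :
    (PySem.List.enumerate l 0).foldl
      (fun oculto p => oculto ++ (if p.1 ∈ ([7, 10, 11, 14] : List Int) then ['x'] else [p.2])) []
    = ([7, 10, 11, 14] : List Nat).foldl
      (fun chars p => if p < chars.length then chars.set p 'x' else chars) l := by
  rw [PySem.List.foldl_append_eq_flatMap]
  simp only [List.foldl, pv_guarded_set, List.nil_append]
  have hfun : (fun (p : Int × Char) => if p.1 ∈ ([7, 10, 11, 14] : List Int) then ['x'] else [p.2])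
      = fun p => [if p.1 ∈ ([7, 10, 11, 14] : List Int) then 'x' else p.2] := by
    funext p; split <;> rfl
  rw [hfun, pv_flatMap_singleton]
  apply List.ext_getElem
  · simp [PySem.List.length_enumerate]
  · intro i h1 h2
    have hi : i < l.length := by simpa [PySem.List.length_enumerate] using h1
    simp only [List.getElem_map, PySem.List.getElem_enumerate, zero_add, List.getElem_set]
    have hmem : (((i : Int)) ∈ ([7, 10, 11, 14] : List Int)) ↔ (i = 7 ∨ i = 10 ∨ i = 11 ∨ i = 14) := by
      simp; omega
    simp only [hmem]
    split_ifs <;> simp_all <;> omega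

-- ===== VERDICT (by name: the statement is the Claim_ definition above) =====
theorem ocultar_digitos_tarjeta_spec : Claim_equal_ocultar_digitos_tarjeta := by
  intro s _
  unfold Spec_ocultar_digitos_tarjeta ocultar_digitos_tarjeta ocultar_digitos_tarjeta_alt
  rw [pv_lists_eq]
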